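-- pv_equiv track=rewrite | github.com/giulicrenna/TUIA-PDI_TP1 | aux_script.py | find_line_bounds
-- ===== SOURCE A (Python) =====
-- def find_line_bounds(lines):
--     line_bounds = []
--     start = None
--     for i, val in enumerate(lines):
--         if val and start is None:
--             start = i
--         elif not val and start is not None:
--             line_bounds.append((start, i-1))
--             start = None
--     if start is not None:
--         line_bounds.append((start, len(lines)-1))
--     return line_bounds
-- ===== SOURCE B (Python) =====
-- def find_line_bounds(lines):
--     vals = [bool(v) for v in lines]
--     starts = [i for i, (v, p) in enumerate(zip(vals, [False] + vals)) if v and not p]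
--     ends = [i for i, (v, nx) in enumerate(zip(vals, vals[1:] + [False])) if v and not nx]
--     return list(zip(starts, ends))
-- ===== Notes on version B (the rewrite author's own statement) =====
-- stated objective: alternative
-- what changed: Replaced A's start/None transition state machine with edge detection over shifted copies of the list: run starts are positions where the value is truthy and the padded-left neighbour is falsy, run ends where the padded-right neighbour is falsy, and the result is the zip of the two index lists.
import Mathlib
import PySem

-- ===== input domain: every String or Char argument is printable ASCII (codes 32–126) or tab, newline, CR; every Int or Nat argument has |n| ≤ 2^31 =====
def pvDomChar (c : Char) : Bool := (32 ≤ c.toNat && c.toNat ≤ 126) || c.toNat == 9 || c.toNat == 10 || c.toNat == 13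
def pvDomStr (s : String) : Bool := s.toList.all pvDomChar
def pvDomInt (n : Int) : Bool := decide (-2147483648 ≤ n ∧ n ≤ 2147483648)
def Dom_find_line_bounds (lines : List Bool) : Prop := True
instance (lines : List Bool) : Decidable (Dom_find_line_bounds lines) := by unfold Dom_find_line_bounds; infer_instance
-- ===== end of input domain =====

-- B replaces A's start/None transition state machine with edge detection over shifted copies
-- of the list (run starts/ends found by comparing each value with its padded neighbours,
-- then zipping the two index lists); alternative decomposition, same cost.

-- ===== PORT A =====
-- one step of A's for-loop: branches in A's order, state = (line_bounds, start)
def fA (s : List (Int × Int) × Option Int) (p : Int × Bool) : List (Int × Int) × Option Int :=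
  if p.2 && s.2.isNone then (s.1, some p.1)
  else if !p.2 && s.2.isSome then (s.1 ++ [(s.2.getD 0, p.1 - 1)], none)
  else s

-- the trailing 'if start is not None: append (start, len(lines)-1)'
def finW (r : List (Int × Int) × Option Int) (e : Int) : List (Int × Int) :=
  match r.2 with
  | none => r.1
  | some st => r.1 ++ [(st, e)]

def find_line_bounds (lines : List Bool) : List (Int × Int) :=
  finW ((PySem.List.enumerate lines 0).foldl fA ([], none)) ((lines.length : Int) - 1)

-- ===== PORT B =====
-- Source B's staged passes: zip(vals, [False]+vals) / zip(vals, vals[1:]+[False]) — Python's zip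
-- truncates to the shorter list, which is List.zip exactly; vals[1:] is List.drop 1 (exact
-- for a list slice from 1).
def find_line_bounds_alt (lines : List Bool) : List (Int × Int) :=
  (((PySem.List.enumerate (lines.zip (false :: lines)) 0).filter
      (fun p => p.2.1 && !p.2.2)).map (·.1)).zip
    (((PySem.List.enumerate (lines.zip (lines.drop 1 ++ [false])) 0).filter
      (fun p => p.2.1 && !p.2.2)).map (·.1))

-- ===== PRECONDITION & SPEC =====
def Spec_find_line_bounds (lines : List Bool) (out : List (Int × Int)) : Prop := out = find_line_bounds_alt lines
instance (lines : List Bool) (out : List (Int × Int)) : Decidable (Spec_find_line_bounds lines out) := by unfold Spec_find_line_bounds; infer_instance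

-- ===== CLAIM (what is proved, stated in full; the proofs are below) =====
def Claim_equal_find_line_bounds : Prop := ∀ (lines : List Bool), Dom_find_line_bounds lines → Spec_find_line_bounds lines (find_line_bounds lines)

-- ===== LEMMAS AND PROOFS =====

-- canonical recursive forms of B's start/end index lists
def S (prev : Bool) (s : Int) : List Bool → List Int
  | [] => []
  | b :: bs => (if b && !prev then [s] else []) ++ S b (s + 1) bs

def E (s : Int) : List Bool → List Int
  | [] => []
  | [b] => if b then [s] else []
  | b :: c :: bs => (if b && !c then [s] else []) ++ E (s + 1) (c :: bs)

-- B's starts pass equals S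
theorem starts_eq : ∀ (bs : List Bool) (prev : Bool) (s : Int),
    ((PySem.List.enumerate (bs.zip (prev :: bs)) s).filter
        (fun p => p.2.1 && !p.2.2)).map (·.1) = S prev s bs := by
  intro bs
  induction bs with
  | nil => intro prev s; simp [PySem.List.enumerate_nil, S]
  | cons b rest ih =>
    intro prev s
    rw [List.zip_cons_cons, PySem.List.enumerate_cons]
    cases b <;> cases prev <;> simp [S] <;> exact ih _ (s + 1)

-- B's ends pass equals E
theorem ends_eq : ∀ (bs : List Bool) (s : Int),
    ((PySem.List.enumerate (bs.zip (bs.drop 1 ++ [false])) s).filter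
        (fun p => p.2.1 && !p.2.2)).map (·.1) = E s bs := by
  intro bs
  induction bs with
  | nil => intro s; simp [PySem.List.enumerate_nil, E]
  | cons b rest ih =>
    intro s
    cases rest with
    | nil =>
      cases b <;>
        simp [PySem.List.enumerate_cons, PySem.List.enumerate_nil, List.filter_cons, E]
    | cons c rest' =>
      have h : ((b :: c :: rest').zip (((b :: c :: rest').drop 1) ++ [false]))
          = (b, c) :: ((c :: rest').zip (((c :: rest').drop 1) ++ [false])) := by
        simp
      rw [h, PySem.List.enumerate_cons]
      cases b <;> cases c <;> simp [E] <;> simpa using ih (s + 1)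

-- a leading false contributes no run end
theorem E_false_cons : ∀ (bs : List Bool) (s : Int), E s (false :: bs) = E (s + 1) bs := by
  intro bs s
  cases bs <;> simp [E]

-- main invariant of A's fold against the zipped S/E lists
theorem main_inv : ∀ (bs : List Bool) (s : Int) (acc : List (Int × Int)),
    (finW ((PySem.List.enumerate bs s).foldl fA (acc, none)) (s + (bs.length : Int) - 1)
        = acc ++ (S false s bs).zip (E s bs))
    ∧ ∀ st : Int,
      finW ((PySem.List.enumerate bs s).foldl fA (acc, some st)) (s + (bs.length : Int) - 1)
        = acc ++ (st :: S true s bs).zip (E (s - 1) (true :: bs)) := by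
  intro bs
  induction bs with
  | nil =>
    intro s acc
    constructor
    · simp [PySem.List.enumerate_nil, finW, S, E]
    · intro st
      simp [PySem.List.enumerate_nil, finW, S, E]
  | cons b bs ih =>
    intro s acc
    have hlen : s + (((b :: bs : List Bool)).length : Int) - 1
        = (s + 1) + (bs.length : Int) - 1 := by
      simp only [List.length_cons]; push_cast; ring
    constructor
    · rw [PySem.List.enumerate_cons, List.foldl_cons, hlen]
      cases b with
      | true =>
        have hstep : fA (acc, none) (s, true) = (acc, some s) := by simp [fA]
        rw [hstep, (ih (s + 1) acc).2 s]
        simp [S, E, show s + 1 - 1 = s from by ring]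
      | false =>
        have hstep : fA (acc, none) (s, false) = (acc, none) := by simp [fA]
        rw [hstep, (ih (s + 1) acc).1]
        cases bs with
        | nil => simp [S, E, PySem.List.enumerate_nil, finW]
        | cons c cs => simp [S, E]
    · intro st
      rw [PySem.List.enumerate_cons, List.foldl_cons, hlen]
      cases b with
      | true =>
        have hstep : fA (acc, some st) (s, true) = (acc, some st) := by simp [fA]
        rw [hstep, (ih (s + 1) acc).2 st]
        simp [S, E, show s + 1 - 1 = s from by ring]
      | false =>
        have hstep : fA (acc, some st) (s, false) = (acc ++ [(st, s - 1)], none) := by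
          simp [fA]
        rw [hstep, (ih (s + 1) (acc ++ [(st, s - 1)])).1]
        simp [S, E, E_false_cons]

-- ===== VERDICT (by name: the statement is the Claim_ definition above) =====
theorem find_line_bounds_spec : Claim_equal_find_line_bounds := by
  intro lines _
  unfold Spec_find_line_bounds find_line_bounds find_line_bounds_alt
  have h := (main_inv lines 0 []).1
  simp only [List.nil_append, zero_add] at h
  rw [h, ← starts_eq lines false 0, ← ends_eq lines 0]
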